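-- pv_equiv track=rewrite | github.com/nakandev/disasmlib | elflib/__init__.py | _split_comment
-- ===== SOURCE A (Python) =====
-- def _split_comment(line):
--     sps = ('#', ';', '//', ('/*', '*/'))
--     min_idx, min_sp = len(line), None
--     for i, sp in enumerate(sps):
--         sp = sp[0] if isinstance(sp, tuple) else sp
--         idx = line.find(sp)
--         if 0 <= idx < min_idx:
--             min_idx, min_sp = idx, sp
--     if min_sp is None:
--         code, comment = line.rstrip(), ''
--     else:
--         if isinstance(min_sp, tuple):
--             code, comment = line.split(min_sp, 1)
--             code = code.rstrip()
--             comment, _ = comment.split(comment, 1)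
--         else:
--             code, comment = line.split(min_sp, 1)
--             code = code.rstrip()
--     return code, comment
-- ===== SOURCE B (Python) =====
-- def _split_comment(line):
--     markers = ('#', ';', '//', '/*')
--     for i in range(len(line)):
--         for m in markers:
--             if line.startswith(m, i):
--                 return line[:i].rstrip(), line[i + len(m):]
--     return line.rstrip(), ''
-- ===== Notes on version B (the rewrite author's own statement) =====
-- stated objective: alternative
-- what changed: Replaces A's four independent str.find scans plus a running min/arg-min fold (and then a re-scan by str.split) with a single left-to-right scan that stops at the first position where any marker starts and splits the line there directly.
import Mathlib
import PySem

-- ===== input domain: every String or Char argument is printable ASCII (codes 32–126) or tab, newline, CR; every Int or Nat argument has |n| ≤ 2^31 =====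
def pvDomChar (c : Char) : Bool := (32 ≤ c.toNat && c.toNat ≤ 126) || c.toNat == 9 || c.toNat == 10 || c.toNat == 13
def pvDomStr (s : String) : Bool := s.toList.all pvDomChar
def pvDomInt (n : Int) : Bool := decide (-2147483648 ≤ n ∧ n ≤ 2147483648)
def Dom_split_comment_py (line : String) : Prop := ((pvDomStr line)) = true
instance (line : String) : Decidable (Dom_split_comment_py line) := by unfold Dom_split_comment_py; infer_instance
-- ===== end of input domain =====

-- B replaces A's four separate find scans + min/arg-min fold (+ split re-scan) by one
-- left-to-right scan that stops at the first marker position and splits there directly.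


-- ===== PORT A =====
-- sps = ('#', ';', '//', ('/*', '*/')): the loop replaces the tuple entry by its first
-- element '/*', so min_sp is always a plain string and the 'isinstance(min_sp, tuple)'
-- branch (and its comment.split) can never run; only the reachable else branch is ported.
def split_comment_py (line : String) : String × String :=
  let sps : List String := ["#", ";", "//", "/*"]
  let r := sps.foldl (fun (acc : Int × Option String) sp =>
      let idx := PySem.Str.find line sp
      if 0 ≤ idx ∧ idx < acc.1 then (idx, some sp) else acc)
    (PySem.Str.len line, none)
  match r.2 with
  | none => (PySem.Str.rstrip line, "")
  | some sp =>
    match PySem.Str.splitMax? line sp 1 with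
    | some [code, comment] => (PySem.Str.rstrip code, comment)
    | _ => (line, line)  -- unreachable: sp occurs in line, so split(sp, 1) yields exactly 2 parts

-- ===== PORT B =====
def pvMarkers : List (List Char) := [['#'], [';'], ['/', '/'], ['/', '*']]

-- the scan 'for i in range(len(line)): for m in markers: if line.startswith(m, i): …';
-- pre holds the already-scanned prefix reversed, so pre.reverse = line[:i]
def pvScan (pre rest : List Char) : List Char × List Char :=
  match rest with
  | [] => (PySem.Chars.rstrip pre.reverse, [])
  | c :: rs =>
    match pvMarkers.find? (fun m => m.isPrefixOf (c :: rs)) with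
    | some m => (PySem.Chars.rstrip pre.reverse, (c :: rs).drop m.length)
    | none => pvScan (c :: pre) rs

def split_comment_py_alt (line : String) : String × String :=
  let p := pvScan [] line.toList
  (String.ofList p.1, String.ofList p.2)

-- ===== PRECONDITION & SPEC =====
def Spec_split_comment_py (line : String) (out : String × String) : Prop := out = split_comment_py_alt line
instance (line : String) (out : String × String) : Decidable (Spec_split_comment_py line out) := by unfold Spec_split_comment_py; infer_instance

-- ===== CLAIM (what is proved, stated in full; the proofs are below) =====
def Claim_equal_split_comment_py : Prop := ∀ (line : String), Dom_split_comment_py line → Spec_split_comment_py line (split_comment_py line)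

-- ===== LEMMAS AND PROOFS =====

-- first index at which m starts in cs (None if m does not occur before the end)
def pvFI (m : List Char) : List Char → Option Nat
  | [] => none
  | c :: rs => if m.isPrefixOf (c :: rs) then some 0 else (pvFI m rs).map (· + 1)

-- first position at which any marker starts, together with the first matching marker
def pvFH : List Char → Option (Nat × List Char)
  | [] => none
  | c :: rs =>
    match pvMarkers.find? (fun m => m.isPrefixOf (c :: rs)) with
    | some m => some (0, m)
    | none => (pvFH rs).map (fun p => (p.1 + 1, p.2))

theorem pvFI_lt_length (m : List Char) : ∀ (cs : List Char) (i : Nat), pvFI m cs = some i → i < cs.length := by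
  intro cs
  induction cs with
  | nil => intro i h; simp [pvFI] at h
  | cons c rs ih =>
    intro i h
    by_cases hp : m.isPrefixOf (c :: rs)
    · simp [pvFI, hp] at h
      subst h; simp
    · simp [pvFI, hp] at h
      obtain ⟨j, hj, rfl⟩ := h
      have := ih j hj
      simp; omega

theorem pvFI_prefix (m : List Char) : ∀ (cs : List Char) (i : Nat), pvFI m cs = some i → m <+: cs.drop i := by
  intro cs
  induction cs with
  | nil => intro i h; simp [pvFI] at h
  | cons c rs ih =>
    intro i h
    by_cases hp : m.isPrefixOf (c :: rs)
    · simp [pvFI, hp] at h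
      subst h
      simpa using List.isPrefixOf_iff_prefix.mp hp
    · simp [pvFI, hp] at h
      obtain ⟨j, hj, rfl⟩ := h
      simpa using ih j hj

theorem pvFI_min (m : List Char) : ∀ (cs : List Char) (i : Nat), pvFI m cs = some i → ∀ j < i, ¬ m <+: cs.drop j := by
  intro cs
  induction cs with
  | nil => intro i h; simp [pvFI] at h
  | cons c rs ih =>
    intro i h j hj
    by_cases hp : m.isPrefixOf (c :: rs)
    · simp [pvFI, hp] at h; omega
    · simp [pvFI, hp] at h
      obtain ⟨k, hk, rfl⟩ := h
      cases j with
      | zero =>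
        simpa using fun hpre => hp (List.isPrefixOf_iff_prefix.mpr hpre)
      | succ j' =>
        simpa using ih k hk j' (by omega)

theorem pvFI_none (m : List Char) (hm : m ≠ []) : ∀ (cs : List Char), pvFI m cs = none → ∀ j, ¬ m <+: cs.drop j := by
  intro cs
  induction cs with
  | nil =>
    intro _ j hpre
    simp at hpre
    exact hm hpre
  | cons c rs ih =>
    intro h j
    by_cases hp : m.isPrefixOf (c :: rs)
    · simp [pvFI, hp] at h
    · simp [pvFI, hp] at h
      cases j with
      | zero =>
        simpa using fun hpre => hp (List.isPrefixOf_iff_prefix.mpr hpre)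
      | succ j' =>
        simpa using ih h j'

theorem pvFind_eq (m : List Char) (hm : m ≠ []) (cs : List Char) :
    PySem.Chars.find cs m = (pvFI m cs).elim (-1) (fun i => (i : Int)) := by
  rcases h : pvFI m cs with _ | i
  · have hni : ¬ m <:+: cs := by
      intro hinf
      have : ∃ j, m <+: cs.drop j := by
        rcases hinf with ⟨pre, suf, heq⟩
        exact ⟨pre.length, by rw [← heq]; simp⟩
      obtain ⟨j, hj⟩ := this
      exact pvFI_none m hm cs h j hj
    simpa using (PySem.Chars.find_eq_neg_one_iff cs m).mpr hni
  · have hinf : m <:+: cs := by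
      have := pvFI_prefix m cs i h
      rcases this with ⟨t, ht⟩
      exact ⟨cs.take i, t, by rw [List.append_assoc, ht]; simp⟩
    have h0 : 0 ≤ PySem.Chars.find cs m := (PySem.Chars.find_nonneg_iff cs m).mpr hinf
    obtain ⟨hp, hmin⟩ := PySem.Chars.find_spec h0
    have hi : (PySem.Chars.find cs m).toNat = i := by
      rcases Nat.lt_trichotomy (PySem.Chars.find cs m).toNat i with hlt | heq | hgt
      · exact absurd hp (pvFI_min m cs i h _ hlt)
      · exact heq
      · exact absurd (pvFI_prefix m cs i h) (hmin i hgt)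
    simp only [Option.elim]
    omega

theorem pvScan_spec : ∀ (rest pre : List Char),
    pvScan pre rest = match pvFH rest with
      | none => (PySem.Chars.rstrip (pre.reverse ++ rest), [])
      | some (i, m) => (PySem.Chars.rstrip (pre.reverse ++ rest.take i), rest.drop (i + m.length)) := by
  intro rest
  induction rest with
  | nil => intro pre; simp [pvScan, pvFH]
  | cons c rs ih =>
    intro pre
    rcases hf : pvMarkers.find? (fun m => m.isPrefixOf (c :: rs)) with _ | m
    · rcases hrec : pvFH rs with _ | ⟨i, m⟩
      · simp only [pvScan, pvFH, hf, hrec]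
        have := ih (c :: pre)
        rw [hrec] at this
        simpa using this
      · simp only [pvScan, pvFH, hf, hrec, Option.map_some]
        have := ih (c :: pre)
        rw [hrec] at this
        simp only at this
        rw [this]
        apply Prod.ext
        · simp
        · simp [Nat.add_right_comm]
    · simp [pvScan, pvFH, hf]

theorem pvFH_none : ∀ (cs : List Char), pvFH cs = none → ∀ m ∈ pvMarkers, pvFI m cs = none := by
  intro cs
  induction cs with
  | nil => intro _ m _; simp [pvFI]
  | cons c rs ih =>
    intro h m hmem
    rcases hf : pvMarkers.find? (fun m => m.isPrefixOf (c :: rs)) with _ | m0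
    · have hnp := List.find?_eq_none.mp hf m hmem
      simp only [pvFH, hf] at h
      have hrec : pvFH rs = none := by
        rcases hfh : pvFH rs with _ | p
        · rfl
        · rw [hfh] at h; simp at h
      simp [pvFI, hnp, ih hrec m hmem]
    · rw [pvFH, hf] at h; simp at h

theorem pvFH_some : ∀ (cs : List Char) (i : Nat) (m : List Char), pvFH cs = some (i, m) →
    (m = ['#'] ∧ pvFI ['#'] cs = some i
      ∧ (∀ j, pvFI [';'] cs = some j → i ≤ j)
      ∧ (∀ j, pvFI ['/', '/'] cs = some j → i ≤ j)
      ∧ (∀ j, pvFI ['/', '*'] cs = some j → i ≤ j))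
    ∨ (m = [';'] ∧ pvFI [';'] cs = some i
      ∧ (∀ j, pvFI ['#'] cs = some j → i < j)
      ∧ (∀ j, pvFI ['/', '/'] cs = some j → i ≤ j)
      ∧ (∀ j, pvFI ['/', '*'] cs = some j → i ≤ j))
    ∨ (m = ['/', '/'] ∧ pvFI ['/', '/'] cs = some i
      ∧ (∀ j, pvFI ['#'] cs = some j → i < j)
      ∧ (∀ j, pvFI [';'] cs = some j → i < j)
      ∧ (∀ j, pvFI ['/', '*'] cs = some j → i ≤ j))
    ∨ (m = ['/', '*'] ∧ pvFI ['/', '*'] cs = some i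
      ∧ (∀ j, pvFI ['#'] cs = some j → i < j)
      ∧ (∀ j, pvFI [';'] cs = some j → i < j)
      ∧ (∀ j, pvFI ['/', '/'] cs = some j → i < j)) := by
  intro cs
  induction cs with
  | nil => intro i m h; simp [pvFH] at h
  | cons c rs ih =>
    intro i m h
    by_cases h0 : List.isPrefixOf ['#'] (c :: rs)
    · left
      have hf : pvMarkers.find? (fun m => m.isPrefixOf (c :: rs)) = some ['#'] := by
        simp [pvMarkers, h0]
      rw [pvFH, hf] at h
      simp at h
      obtain ⟨rfl, rfl⟩ := h
      exact ⟨rfl, by simp [pvFI, h0], fun j _ => Nat.zero_le j, fun j _ => Nat.zero_le j, fun j _ => Nat.zero_le j⟩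
    · by_cases h1 : List.isPrefixOf [';'] (c :: rs)
      · right; left
        have hf : pvMarkers.find? (fun m => m.isPrefixOf (c :: rs)) = some [';'] := by
          simp [pvMarkers, List.find?, h0, h1]
        rw [pvFH, hf] at h
        simp at h
        obtain ⟨rfl, rfl⟩ := h
        refine ⟨rfl, by simp [pvFI, h1], ?_, fun j _ => Nat.zero_le j, fun j _ => Nat.zero_le j⟩
        intro j hj
        simp [pvFI, h0] at hj
        omega
      · by_cases h2 : List.isPrefixOf ['/', '/'] (c :: rs)
        · right; right; left
          have hf : pvMarkers.find? (fun m => m.isPrefixOf (c :: rs)) = some ['/', '/'] := by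
            simp [pvMarkers, List.find?, h0, h1, h2]
          rw [pvFH, hf] at h
          simp at h
          obtain ⟨rfl, rfl⟩ := h
          refine ⟨rfl, by simp [pvFI, h2], ?_, ?_, fun j _ => Nat.zero_le j⟩
          all_goals intro j hj
          · simp [pvFI, h0] at hj; omega
          · simp [pvFI, h1] at hj; omega
        · by_cases h3 : List.isPrefixOf ['/', '*'] (c :: rs)
          · right; right; right
            have hf : pvMarkers.find? (fun m => m.isPrefixOf (c :: rs)) = some ['/', '*'] := by
              simp [pvMarkers, List.find?, h0, h1, h2, h3]
            rw [pvFH, hf] at h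
            simp at h
            obtain ⟨rfl, rfl⟩ := h
            refine ⟨rfl, by simp [pvFI, h3], ?_, ?_, ?_⟩
            all_goals intro j hj
            · simp [pvFI, h0] at hj; omega
            · simp [pvFI, h1] at hj; omega
            · simp [pvFI, h2] at hj; omega
          · have hf : pvMarkers.find? (fun m => m.isPrefixOf (c :: rs)) = none := by
              simp [pvMarkers, List.find?, h0, h1, h2, h3]
            rw [pvFH, hf] at h
            rcases hrec : pvFH rs with _ | ⟨i', m'⟩
            · rw [hrec] at h; simp at h
            · rw [hrec] at h
              simp at h
              obtain ⟨rfl, rfl⟩ := h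
              rcases ih i' m' hrec with ⟨rfl, hfi, ha, hb, hc⟩ | ⟨rfl, hfi, ha, hb, hc⟩ | ⟨rfl, hfi, ha, hb, hc⟩ | ⟨rfl, hfi, ha, hb, hc⟩
              · left
                refine ⟨rfl, by simp [pvFI, h0, hfi], ?_, ?_, ?_⟩
                all_goals intro j hj
                · simp [pvFI, h1] at hj; obtain ⟨k, hk, rfl⟩ := hj; exact Nat.succ_le_succ (ha k hk)
                · simp [pvFI, h2] at hj; obtain ⟨k, hk, rfl⟩ := hj; exact Nat.succ_le_succ (hb k hk)
                · simp [pvFI, h3] at hj; obtain ⟨k, hk, rfl⟩ := hj; exact Nat.succ_le_succ (hc k hk)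
              · right; left
                refine ⟨rfl, by simp [pvFI, h1, hfi], ?_, ?_, ?_⟩
                all_goals intro j hj
                · simp [pvFI, h0] at hj; obtain ⟨k, hk, rfl⟩ := hj; exact Nat.succ_lt_succ (ha k hk)
                · simp [pvFI, h2] at hj; obtain ⟨k, hk, rfl⟩ := hj; exact Nat.succ_le_succ (hb k hk)
                · simp [pvFI, h3] at hj; obtain ⟨k, hk, rfl⟩ := hj; exact Nat.succ_le_succ (hc k hk)
              · right; right; left
                refine ⟨rfl, by simp [pvFI, h2, hfi], ?_, ?_, ?_⟩
                all_goals intro j hj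
                · simp [pvFI, h0] at hj; obtain ⟨k, hk, rfl⟩ := hj; exact Nat.succ_lt_succ (ha k hk)
                · simp [pvFI, h1] at hj; obtain ⟨k, hk, rfl⟩ := hj; exact Nat.succ_lt_succ (hb k hk)
                · simp [pvFI, h3] at hj; obtain ⟨k, hk, rfl⟩ := hj; exact Nat.succ_le_succ (hc k hk)
              · right; right; right
                refine ⟨rfl, by simp [pvFI, h3, hfi], ?_, ?_, ?_⟩
                all_goals intro j hj
                · simp [pvFI, h0] at hj; obtain ⟨k, hk, rfl⟩ := hj; exact Nat.succ_lt_succ (ha k hk)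
                · simp [pvFI, h1] at hj; obtain ⟨k, hk, rfl⟩ := hj; exact Nat.succ_lt_succ (hb k hk)
                · simp [pvFI, h2] at hj; obtain ⟨k, hk, rfl⟩ := hj; exact Nat.succ_lt_succ (hc k hk)

theorem pvGoZero (m : List Char) : ∀ (fuel : Nat) (l cur : List Char) (acc : List (List Char)),
    PySem.Chars.splitOnMax.go m fuel 0 l cur acc = ((cur.reverse ++ l) :: acc).reverse := by
  intro fuel l cur acc
  rw [PySem.Chars.splitOnMax.go.eq_def]
  cases fuel <;> cases l <;> simp

theorem pvGoSpec (m : List Char) : ∀ (cs : List Char) (fuel i : Nat) (cur : List Char) (acc : List (List Char)),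
    cs.length < fuel → pvFI m cs = some i →
    PySem.Chars.splitOnMax.go m fuel 1 cs cur acc
      = ((cs.drop (i + m.length)) :: (cur.reverse ++ cs.take i) :: acc).reverse := by
  intro cs
  induction cs with
  | nil => intro fuel i cur acc _ hfi; simp [pvFI] at hfi
  | cons c rs ih =>
    intro fuel i cur acc hfuel hfi
    cases fuel with
    | zero => omega
    | succ f =>
      rw [PySem.Chars.splitOnMax.go.eq_def]
      by_cases hp : m.isPrefixOf (c :: rs)
      · simp only [pvFI, hp, if_pos] at hfi
        simp only [Option.some.injEq] at hfi
        subst hfi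
        simp only [hp, if_pos]
        rw [if_neg (by omega), pvGoZero]
        simp
      · simp only [pvFI, hp] at hfi
        simp only [Bool.false_eq_true, if_false, Option.map_eq_some_iff] at hfi
        obtain ⟨k, hk, rfl⟩ := hfi
        simp only [hp, Bool.false_eq_true, if_false]
        rw [if_neg (by omega)]
        rw [ih f k (c :: cur) acc (by simpa using Nat.lt_of_succ_lt_succ hfuel) hk]
        simp [Nat.add_right_comm]

theorem pvSplitOnMax_spec (m cs : List Char) (i : Nat) (h : pvFI m cs = some i) :
    PySem.Chars.splitOnMax cs m 1 = [cs.take i, cs.drop (i + m.length)] := by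
  rw [PySem.Chars.splitOnMax]
  rw [if_neg (by omega)]
  norm_num
  rw [pvGoSpec m cs (cs.length + 1) i [] [] (by omega) h]
  simp

theorem pvRstrip_ofList (s : String) : PySem.Str.rstrip s = String.ofList (PySem.Chars.rstrip s.toList) := by
  rw [← PySem.Str.toList_rstrip, String.ofList_toList]

theorem pvSplitStr (line sp : String) (i : Nat) (hne : sp.toList ≠ []) (hfi : pvFI sp.toList line.toList = some i) :
    (match PySem.Str.splitMax? line sp 1 with
     | some [code, comment] => (PySem.Str.rstrip code, comment)
     | _ => (line, line))
    = (String.ofList (PySem.Chars.rstrip (line.toList.take i)),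
       String.ofList (line.toList.drop (i + sp.toList.length))) := by
  have hchars : PySem.Chars.splitMax? line.toList sp.toList 1
      = some [line.toList.take i, line.toList.drop (i + sp.toList.length)] := by
    rw [PySem.Chars.splitMax?, if_neg (by simpa [List.isEmpty_iff] using hne),
      pvSplitOnMax_spec sp.toList line.toList i hfi]
  have hmap := PySem.Str.splitMax?_map line sp 1
  rw [hchars] at hmap
  rcases hs : PySem.Str.splitMax? line sp 1 with _ | ls
  · rw [hs] at hmap; simp at hmap
  · rw [hs] at hmap
    simp only [Option.map_some, Option.some.injEq] at hmap
    rcases ls with _ | ⟨a, ls⟩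
    · simp at hmap
    rcases ls with _ | ⟨b, ls⟩
    · simp at hmap
    rcases ls with _ | ⟨x, ls⟩
    · simp only [List.map_cons, List.map_nil, List.cons.injEq, and_true] at hmap
      obtain ⟨hma, hmb⟩ := hmap
      simp only []
      rw [pvRstrip_ofList a, hma, ← hmb, String.ofList_toList]
    · simp at hmap

theorem pvElimGe (m cs : List Char) (i : Nat) (hge : ∀ j, pvFI m cs = some j → i ≤ j) :
    ((pvFI m cs).elim (-1) fun k => (k : Int)) = -1
    ∨ ((i : Int) ≤ ((pvFI m cs).elim (-1) fun k => (k : Int))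
        ∧ ((pvFI m cs).elim (-1) fun k => (k : Int)) < (cs.length : Int)) := by
  rcases h : pvFI m cs with _ | j
  · left; rfl
  · right
    have h1 := hge j h
    have h2 := pvFI_lt_length m cs j h
    simp only [Option.elim]
    omega

theorem pvElimGt (m cs : List Char) (i : Nat) (hgt : ∀ j, pvFI m cs = some j → i < j) :
    ((pvFI m cs).elim (-1) fun k => (k : Int)) = -1
    ∨ ((i : Int) < ((pvFI m cs).elim (-1) fun k => (k : Int))
        ∧ ((pvFI m cs).elim (-1) fun k => (k : Int)) < (cs.length : Int)) := by
  rcases h : pvFI m cs with _ | j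
  · left; rfl
  · right
    have h1 := hgt j h
    have h2 := pvFI_lt_length m cs j h
    simp only [Option.elim]
    omega

set_option maxHeartbeats 2000000 in
theorem pvMain (line : String) : split_comment_py line = split_comment_py_alt line := by
  have e0 : ("#" : String).toList = ['#'] := rfl
  have e1 : (";" : String).toList = [';'] := rfl
  have e2 : ("//" : String).toList = ['/', '/'] := rfl
  have e3 : ("/*" : String).toList = ['/', '*'] := rfl
  simp only [split_comment_py, split_comment_py_alt, List.foldl_cons, List.foldl_nil,
    PySem.Str.find_eq, PySem.Str.len_eq, e0, e1, e2, e3]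
  rw [pvScan_spec]
  rcases h : pvFH line.toList with _ | ⟨i, m⟩
  · have hf0 := pvFH_none _ h ['#'] (by simp [pvMarkers])
    have hf1 := pvFH_none _ h [';'] (by simp [pvMarkers])
    have hf2 := pvFH_none _ h ['/', '/'] (by simp [pvMarkers])
    have hf3 := pvFH_none _ h ['/', '*'] (by simp [pvMarkers])
    rw [pvFind_eq _ (by simp) _, pvFind_eq _ (by simp) _, pvFind_eq _ (by simp) _,
      pvFind_eq _ (by simp) _, hf0, hf1, hf2, hf3]
    norm_num
    rw [pvRstrip_ofList]
  · rcases pvFH_some _ _ _ h with ⟨rfl, hfi, ha, hb, hc⟩ | ⟨rfl, hfi, ha, hb, hc⟩ |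
      ⟨rfl, hfi, ha, hb, hc⟩ | ⟨rfl, hfi, ha, hb, hc⟩
    all_goals
      rw [pvFind_eq _ (by simp) _, pvFind_eq _ (by simp) _, pvFind_eq _ (by simp) _,
        pvFind_eq _ (by simp) _]
    all_goals
      have hl := pvFI_lt_length _ _ _ hfi
      have hlen : (i : Int) < (line.toList.length : Int) := by exact_mod_cast hl
    -- case m = ['#']
    · have f0 : ((pvFI ['#'] line.toList).elim (-1) fun k => (k : Int)) = (i : Int) := by rw [hfi]; rfl
      rw [f0]
      have fa := pvElimGe _ _ _ ha
      have fb := pvElimGe _ _ _ hb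
      have fc := pvElimGe _ _ _ hc
      generalize hA : ((pvFI [';'] line.toList).elim (-1) fun k => (k : Int)) = a at fa ⊢
      generalize hB : ((pvFI ['/', '/'] line.toList).elim (-1) fun k => (k : Int)) = b at fb ⊢
      generalize hC : ((pvFI ['/', '*'] line.toList).elim (-1) fun k => (k : Int)) = c at fc ⊢
      rcases fa with rfl | ⟨ha1, ha2⟩ <;> rcases fb with rfl | ⟨hb1, hb2⟩ <;>
        rcases fc with rfl | ⟨hc1, hc2⟩ <;>
        split_ifs <;>
        first
          | omega
          | simp [pvSplitStr line "#" i (by simp) hfi]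
    -- case m = [';']
    · have f0 : ((pvFI [';'] line.toList).elim (-1) fun k => (k : Int)) = (i : Int) := by rw [hfi]; rfl
      rw [f0]
      have fa := pvElimGt _ _ _ ha
      have fb := pvElimGe _ _ _ hb
      have fc := pvElimGe _ _ _ hc
      generalize hA : ((pvFI ['#'] line.toList).elim (-1) fun k => (k : Int)) = a at fa ⊢
      generalize hB : ((pvFI ['/', '/'] line.toList).elim (-1) fun k => (k : Int)) = b at fb ⊢
      generalize hC : ((pvFI ['/', '*'] line.toList).elim (-1) fun k => (k : Int)) = c at fc ⊢
      rcases fa with rfl | ⟨ha1, ha2⟩ <;> rcases fb with rfl | ⟨hb1, hb2⟩ <;>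
        rcases fc with rfl | ⟨hc1, hc2⟩ <;>
        split_ifs <;>
        first
          | omega
          | simp [pvSplitStr line ";" i (by simp) hfi]
    -- case m = ['/', '/']
    · have f0 : ((pvFI ['/', '/'] line.toList).elim (-1) fun k => (k : Int)) = (i : Int) := by rw [hfi]; rfl
      rw [f0]
      have fa := pvElimGt _ _ _ ha
      have fb := pvElimGt _ _ _ hb
      have fc := pvElimGe _ _ _ hc
      generalize hA : ((pvFI ['#'] line.toList).elim (-1) fun k => (k : Int)) = a at fa ⊢
      generalize hB : ((pvFI [';'] line.toList).elim (-1) fun k => (k : Int)) = b at fb ⊢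
      generalize hC : ((pvFI ['/', '*'] line.toList).elim (-1) fun k => (k : Int)) = c at fc ⊢
      rcases fa with rfl | ⟨ha1, ha2⟩ <;> rcases fb with rfl | ⟨hb1, hb2⟩ <;>
        rcases fc with rfl | ⟨hc1, hc2⟩ <;>
        split_ifs <;>
        first
          | omega
          | simp [pvSplitStr line "//" i (by simp) hfi]
    -- case m = ['/', '*']
    · have f0 : ((pvFI ['/', '*'] line.toList).elim (-1) fun k => (k : Int)) = (i : Int) := by rw [hfi]; rfl
      rw [f0]
      have fa := pvElimGt _ _ _ ha
      have fb := pvElimGt _ _ _ hb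
      have fc := pvElimGt _ _ _ hc
      generalize hA : ((pvFI ['#'] line.toList).elim (-1) fun k => (k : Int)) = a at fa ⊢
      generalize hB : ((pvFI [';'] line.toList).elim (-1) fun k => (k : Int)) = b at fb ⊢
      generalize hC : ((pvFI ['/', '/'] line.toList).elim (-1) fun k => (k : Int)) = c at fc ⊢
      rcases fa with rfl | ⟨ha1, ha2⟩ <;> rcases fb with rfl | ⟨hb1, hb2⟩ <;>
        rcases fc with rfl | ⟨hc1, hc2⟩ <;>
        split_ifs <;>
        first
          | omega
          | simp [pvSplitStr line "/*" i (by simp) hfi]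

-- ===== VERDICT (by name: the statement is the Claim_ definition above) =====
theorem split_comment_py_spec : Claim_equal_split_comment_py := by
  intro line _
  unfold Spec_split_comment_py
  exact pvMain line
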